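-- pv_equiv track=rewrite | github.com/NestorVil/PY119-Practice-Problems | 18.py | equal_sum_index
-- ===== SOURCE A (Python) =====
-- def equal_sum_index(input_list):
--     checker_list = []
--
--     for idx, num in enumerate(input_list):
--         first_half = input_list[:idx]
--         last_half = input_list[idx + 1:]
--
--         if sum(first_half) == sum(last_half):
--             checker_list.append(idx)
--
--     return min(checker_list) if checker_list else -1
-- ===== SOURCE B (Python) =====
-- def equal_sum_index(input_list):
--     total = sum(input_list)
--     left = 0
--     for idx, num in enumerate(input_list):
--         if 2 * left == total - num:
--             return idx
--         left += num
--     return -1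
-- ===== Notes on version B (the rewrite author's own statement) =====
-- stated objective: faster
-- what changed: Replaces per-index slicing and re-summing (and the final min over all qualifying indices) with a single pass that tracks a running left sum against the precomputed total and returns at the first qualifying index.
import Mathlib
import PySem

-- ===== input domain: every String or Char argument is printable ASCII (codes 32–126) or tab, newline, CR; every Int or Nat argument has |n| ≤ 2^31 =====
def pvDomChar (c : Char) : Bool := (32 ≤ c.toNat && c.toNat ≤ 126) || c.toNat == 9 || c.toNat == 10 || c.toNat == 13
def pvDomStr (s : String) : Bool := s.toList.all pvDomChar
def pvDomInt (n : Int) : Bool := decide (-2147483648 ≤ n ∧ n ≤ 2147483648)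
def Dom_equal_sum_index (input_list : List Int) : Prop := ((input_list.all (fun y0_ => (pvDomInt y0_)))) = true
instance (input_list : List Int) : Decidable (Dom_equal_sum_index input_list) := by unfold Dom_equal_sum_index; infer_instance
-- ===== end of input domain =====

-- B replaces A's per-index slicing/re-summing and final min with one running-sum pass (O(n^2) → O(n)).

-- ===== PORT A =====
def equal_sum_index (input_list : List Int) : Int :=
  let checker_list := (PySem.List.enumerate input_list 0).foldl
    (fun acc p =>
      let first_half := PySem.List.slice input_list none (some p.1)
      let last_half := PySem.List.slice input_list (some (p.1 + 1)) none
      if first_half.sum == last_half.sum then acc ++ [p.1] else acc) []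
  match PySem.List.min? checker_list (fun x => x) with
  | some m => m
  | none => -1

-- ===== PORT B =====
def esiGo (l : List Int) (total left idx : Int) : Int :=
  match l with
  | [] => -1
  | num :: rest => if 2 * left == total - num then idx else esiGo rest total (left + num) (idx + 1)

def equal_sum_index_alt (input_list : List Int) : Int :=
  esiGo input_list input_list.sum 0 0

-- ===== PRECONDITION & SPEC =====
def Spec_equal_sum_index (input_list : List Int) (out : Int) : Prop := out = equal_sum_index_alt input_list
instance (input_list : List Int) (out : Int) : Decidable (Spec_equal_sum_index input_list out) := by unfold Spec_equal_sum_index; infer_instance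

-- ===== CLAIM (what is proved, stated in full; the proofs are below) =====
def Claim_equal_equal_sum_index : Prop := ∀ (input_list : List Int), Dom_equal_sum_index input_list → Spec_equal_sum_index input_list (equal_sum_index input_list)

-- ===== LEMMAS AND PROOFS =====

-- A's condition at index i, as it appears in the port.
def esiCond (l : List Int) (p : Int × Int) : Bool :=
  (PySem.List.slice l none (some p.1)).sum == (PySem.List.slice l (some (p.1 + 1)) none).sum

-- min of a strictly increasing list is its head
theorem min?_eq_head_of_pairwise_lt (l : List Int) (h : l.Pairwise (· < ·)) :
    PySem.List.min? l (fun x => x) = l.head? := by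
  cases l with
  | nil => simp [PySem.List.min?_eq_none_iff]
  | cons x t =>
    have hne : PySem.List.min? (x :: t) (fun x => x) ≠ none := by
      simp [PySem.List.min?_eq_none_iff]
    obtain ⟨m, hm⟩ := Option.ne_none_iff_exists'.mp hne
    have hmem := PySem.List.min?_mem hm
    have hmin := PySem.List.min?_isMin hm x (by simp)
    rcases List.mem_cons.mp hmem with h1 | h1
    · simp [hm, h1]
    · exfalso
      have := (List.pairwise_cons.mp h).1 m h1
      omega

-- the one-pass B equals head-of-filtered-qualifying-indices on any split l = pre ++ suf
theorem esiGo_eq (l : List Int) : ∀ (suf pre : List Int), l = pre ++ suf →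
    (match (((PySem.List.enumerate suf (pre.length : Int)).filter (esiCond l)).map (·.1)).head? with
     | some m => m
     | none => -1)
    = esiGo suf l.sum pre.sum (pre.length : Int) := by
  intro suf
  induction suf with
  | nil => intro pre h; simp [PySem.List.enumerate_nil, esiGo]
  | cons x xs ih =>
    intro pre h
    have hfirst : PySem.List.slice l none (some (pre.length : Int)) = pre := by
      rw [PySem.List.slice_to_natCast, h]
      simp
    have hlast : PySem.List.slice l (some ((pre.length : Int) + 1)) none = xs := by
      have : ((pre.length : Int) + 1) = ((pre.length + 1 : Nat) : Int) := by push_cast; ring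
      rw [this, PySem.List.slice_from_natCast, h]
      rw [← List.drop_drop, List.drop_left]
      rfl
    have hsum : l.sum = pre.sum + (x + xs.sum) := by
      rw [h]; simp
    have hcond : esiCond l ((pre.length : Int), x) = (2 * pre.sum == l.sum - x) := by
      simp only [esiCond, hfirst, hlast, hsum]
      by_cases hc : pre.sum = xs.sum
      · simp [hc]; omega
      · simp [hc]; omega
    rw [PySem.List.enumerate_cons, List.filter_cons]
    simp only [hcond, esiGo]
    by_cases hc : (2 * pre.sum == l.sum - x) = true
    · simp [hc]
    · simp only [hc, Bool.false_eq_true, if_false]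
      have := ih (pre ++ [x]) (by simp [h])
      simpa [List.sum_append] using this

-- filtered-and-projected enumerate is strictly increasing
theorem checker_pairwise (l suf : List Int) (s : Int) :
    (((PySem.List.enumerate suf s).filter (esiCond l)).map (·.1)).Pairwise (· < ·) := by
  have h1 := PySem.List.pairwise_lt_enumerate (xs := suf) (s := s)
  have h2 := List.Pairwise.filter (p := esiCond l) h1
  exact (List.pairwise_map).mpr h2

-- ===== VERDICT (by name: the statement is the Claim_ definition above) =====
theorem equal_sum_index_spec : Claim_equal_equal_sum_index := by
  intro l _
  show equal_sum_index l = equal_sum_index_alt l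
  unfold equal_sum_index equal_sum_index_alt
  show (match PySem.List.min? (List.foldl
      (fun acc p => if esiCond l p then acc ++ [p.1] else acc) []
      (PySem.List.enumerate l 0)) (fun x => x) with
    | some m => m
    | none => -1) = esiGo l l.sum 0 0
  rw [PySem.List.foldl_append_if (p := esiCond l) (f := (·.1))]
  rw [min?_eq_head_of_pairwise_lt _ (by simpa using checker_pairwise l l 0)]
  have := esiGo_eq l l [] (by simp)
  simpa using this
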